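-- pv_equiv track=rewrite | github.com/farhanferoz/tokenol | src/tokenol/serve/state.py | _disambiguate_cwd_labels
-- ===== SOURCE A (Python) =====
-- def _disambiguate_cwd_labels(cwds: set[str] | list[str]) -> dict[str, str]:
--     """Return {cwd: label} where each label is the shortest path suffix unique among *cwds*.
--
--     Non-colliding cwds get the plain basename. Colliding ones get parent segments
--     prepended until each is globally unique — e.g. ``/.../mercor/agentic-bench-gh8nb``
--     and ``/.../agentic-bench-gh8nb`` resolve to ``mercor/agentic-bench-gh8nb`` and
--     ``dev/agentic-bench-gh8nb`` respectively.
--     """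
--     labels = {cwd: _cwd_basename(cwd) for cwd in cwds}
--     groups: dict[str, list[str]] = {}
--     for cwd, lbl in labels.items():
--         groups.setdefault(lbl, []).append(cwd)
--     for colliding in groups.values():
--         if len(colliding) < 2:
--             continue
--         segs = 2
--         while True:
--             candidates = {
--                 cwd: "/".join(cwd.strip("/").split("/")[-segs:]) or "–"
--                 for cwd in colliding
--             }
--             if len(set(candidates.values())) == len(colliding):
--                 labels.update(candidates)
--                 break
--             segs += 1
--             if segs > 20:  # pathological — fall back to full paths
--                 labels.update({cwd: cwd for cwd in colliding})
--                 break
--     return labels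
--
-- def _cwd_basename(cwd: str) -> str:
--     return cwd.split("/")[-1] if cwd else "–"
-- ===== SOURCE B (Python) =====
-- def _cwd_basename(cwd):
--     return cwd.split("/")[-1] if cwd else "\u2013"
--
--
-- def _suffix(cwd, k):
--     return "/".join(cwd.strip("/").split("/")[-k:]) or "\u2013"
--
--
-- def _label_for(cwd, all_cwds):
--     """Shortest unique suffix label for *cwd* among *all_cwds* (pure, no mutation)."""
--     base = _cwd_basename(cwd)
--     group = [c for c in all_cwds if _cwd_basename(c) == base]
--     if len(group) < 2:
--         return base
--     for k in range(2, 21):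
--         if len({_suffix(c, k) for c in group}) == len(group):
--             return _suffix(cwd, k)
--     return cwd
--
--
-- def _disambiguate_cwd_labels(cwds):
--     seen = []
--     for c in cwds:
--         if c not in seen:
--             seen.append(c)
--     return {c: _label_for(c, seen) for c in seen}
-- ===== Notes on version B (the rewrite author's own statement) =====
-- stated objective: simpler
-- what changed: Replaces A's three-stage mutable-dict pipeline (basename dict, setdefault grouping dict, in-place label updates driven by a while loop over a shared segs counter) with a pure per-path function: each distinct cwd independently recomputes its basename group by filtering and scans k=2..20 for the first suffix length that makes the whole group unique, so the result is a single comprehension with no mutation.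
import Mathlib
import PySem

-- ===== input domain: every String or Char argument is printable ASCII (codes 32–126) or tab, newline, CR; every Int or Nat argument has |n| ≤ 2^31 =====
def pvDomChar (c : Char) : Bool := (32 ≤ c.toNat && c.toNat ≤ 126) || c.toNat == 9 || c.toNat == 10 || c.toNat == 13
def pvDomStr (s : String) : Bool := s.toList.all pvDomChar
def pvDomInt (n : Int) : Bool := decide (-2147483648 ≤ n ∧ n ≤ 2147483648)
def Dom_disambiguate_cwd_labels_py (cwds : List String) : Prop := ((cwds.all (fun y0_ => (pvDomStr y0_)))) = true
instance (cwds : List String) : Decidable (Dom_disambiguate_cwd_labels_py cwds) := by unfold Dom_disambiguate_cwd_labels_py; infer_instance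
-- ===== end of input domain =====

-- B replaces A's mutable-dict pipeline (grouping dict + in-place label updates from a
-- while loop) with a pure per-path label function evaluated in one comprehension; same
-- return value, no speed claim.

-- ===== PORT A =====
-- _cwd_basename: cwd.split("/")[-1] if cwd else "–"  (split is nonempty, so [-1] never raises)
def pvBasenameA (cwd : String) : String :=
  if cwd ≠ "" then PySem.List.pyGetD ((PySem.Str.split? cwd "/").getD []) (-1) "" else "–"

-- "/".join(cwd.strip("/").split("/")[-segs:]) or "–"
def pvSuffixA (segs : Int) (cwd : String) : String :=
  let j := PySem.Str.join "/"
    (PySem.List.slice ((PySem.Str.split? (PySem.Str.stripChars cwd "/") "/").getD []) (some (-segs)) none)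
  if j ≠ "" then j else "–"

-- the `while True` loop of A; it runs segs = 2..20 and then falls back, so fuel 19
-- (strictly more than the 18 possible increments) is never exhausted
def pvWhileA (colliding : List String) : Nat → Int → PySem.Dict String String → PySem.Dict String String
  | 0, _, labels => labels
  | fuel + 1, segs, labels =>
    let candidates := colliding.foldl (fun d cwd => d.insert cwd (pvSuffixA segs cwd)) PySem.Dict.empty
    if (PySem.Set.ofList candidates.values).length = colliding.length then
      labels.update candidates.items
    else if segs + 1 > 20 then
      labels.update ((colliding.foldl (fun d cwd => d.insert cwd cwd) PySem.Dict.empty).items)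
    else
      pvWhileA colliding fuel (segs + 1) labels

def disambiguate_cwd_labels_py (cwds : List String) : List (String × String) :=
  let labels := cwds.foldl (fun d cwd => d.insert cwd (pvBasenameA cwd)) PySem.Dict.empty
  let groups := labels.items.foldl
    (fun g p => g.modify p.2 [] (fun v => v ++ [p.1])) (PySem.Dict.empty : PySem.Dict String (List String))
  let final := groups.values.foldl
    (fun lab colliding => if colliding.length < 2 then lab else pvWhileA colliding 19 2 lab) labels
  final.items

-- ===== PORT B =====
def pvBasenameB (cwd : String) : String :=
  if cwd ≠ "" then PySem.List.pyGetD ((PySem.Str.split? cwd "/").getD []) (-1) "" else "–"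

def pvSuffixB (cwd : String) (k : Int) : String :=
  let j := PySem.Str.join "/"
    (PySem.List.slice ((PySem.Str.split? (PySem.Str.stripChars cwd "/") "/").getD []) (some (-k)) none)
  if j ≠ "" then j else "–"

-- the `for k in range(2, 21)` scan of _label_for; past the end it returns the full path
def pvFindKB (cwd : String) (group : List String) : List Int → String
  | [] => cwd
  | k :: ks =>
    if (PySem.Set.ofList (group.map (fun c => pvSuffixB c k))).length = group.length then
      pvSuffixB cwd k
    else pvFindKB cwd group ks

def pvLabelForB (cwd : String) (allCwds : List String) : String :=
  let base := pvBasenameB cwd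
  let group := allCwds.filter (fun c => pvBasenameB c == base)
  if group.length < 2 then base
  else pvFindKB cwd group (PySem.List.pyRange 2 21 1)

def disambiguate_cwd_labels_py_alt (cwds : List String) : List (String × String) :=
  let seen := cwds.foldl (fun s c => if s.contains c then s else s ++ [c]) []
  (seen.foldl (fun d c => d.insert c (pvLabelForB c seen)) PySem.Dict.empty).items

-- ===== PRECONDITION & SPEC =====
def Spec_disambiguate_cwd_labels_py (cwds : List String) (out : List (String × String)) : Prop := out = disambiguate_cwd_labels_py_alt cwds
instance (cwds : List String) (out : List (String × String)) : Decidable (Spec_disambiguate_cwd_labels_py cwds out) := by unfold Spec_disambiguate_cwd_labels_py; infer_instance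

-- ===== CLAIM (what is proved, stated in full; the proofs are below) =====
def Claim_equal_disambiguate_cwd_labels_py : Prop := ∀ (cwds : List String), Dom_disambiguate_cwd_labels_py cwds → Spec_disambiguate_cwd_labels_py cwds (disambiguate_cwd_labels_py cwds)

-- ===== LEMMAS AND PROOFS =====

theorem pv_any_beq (L : List String) (x : String) : (L.any fun y => y == x) = decide (x ∈ L) := by
  by_cases h : x ∈ L
  · simp only [h, decide_true, List.any_eq_true, beq_iff_eq]
    exact ⟨x, h, rfl⟩
  · simp only [h, decide_false, List.any_eq_false, beq_iff_eq]
    intro y hy he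
    exact h (he ▸ hy)
theorem pv_contains_map (f : String → String) (L : List String) (x : String) :
    (PySem.Dict.mk (L.map (fun c => (c, f c)))).contains x = L.contains x := by
  simp [PySem.Dict.contains, List.any_map, Function.comp_def, pv_any_beq]
theorem pv_insert_map (dd : List String) (h : String → String) (c : String) (v : String)
    (hc : c ∈ dd) :
    (PySem.Dict.mk (dd.map (fun x => (x, h x)))).insert c v
      = PySem.Dict.mk (dd.map (fun x => (x, if x = c then v else h x))) := by
  have hcon : (PySem.Dict.mk (dd.map (fun x => (x, h x)))).contains c = true := by
    rw [pv_contains_map]; simpa using hc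
  simp only [PySem.Dict.insert, hcon, if_pos, List.map_map]
  congr 1
  apply List.map_congr_left
  intro a _
  by_cases hac : a = c <;> simp [hac]
theorem pv_foldl_insert_map (f : String → String) (xs L : List String) :
    xs.foldl (fun d c => d.insert c (f c)) (PySem.Dict.mk (L.map (fun c => (c, f c))))
      = PySem.Dict.mk ((xs.foldl (fun s c => if s.contains c then s else s ++ [c]) L).map (fun c => (c, f c))) := by
  induction xs generalizing L with
  | nil => rfl
  | cons x xs ih =>
    simp only [List.foldl_cons]
    by_cases hm : x ∈ L
    · have h1 : (PySem.Dict.mk (L.map (fun c => (c, f c)))).insert x (f x)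
          = PySem.Dict.mk (L.map (fun c => (c, f c))) := by
        rw [pv_insert_map L f x (f x) hm]
        congr 1
        apply List.map_congr_left
        intro a _
        by_cases hax : a = x <;> simp [hax]
      have h2 : L.contains x = true := by simpa using hm
      rw [h1, h2, if_pos rfl, ih]
    · have h2 : L.contains x = false := by simpa using hm
      have hcon : (PySem.Dict.mk (L.map (fun c => (c, f c)))).contains x = false := by
        rw [pv_contains_map]; simpa using hm
      have h1 : (PySem.Dict.mk (L.map (fun c => (c, f c)))).insert x (f x)
          = PySem.Dict.mk ((L ++ [x]).map (fun c => (c, f c))) := by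
        simp [PySem.Dict.insert, hcon]
      rw [h1, h2, ih]
      simp
theorem pv_update_map (dd : List String) (g : List String) (F h : String → String)
    (hg : ∀ c ∈ g, c ∈ dd) :
    (PySem.Dict.mk (dd.map (fun x => (x, h x)))).update (g.map (fun c => (c, F c)))
      = PySem.Dict.mk (dd.map (fun x => (x, if x ∈ g then F x else h x))) := by
  induction g generalizing h with
  | nil => simp [PySem.Dict.update]
  | cons a g ih =>
    have ha : a ∈ dd := hg a (List.mem_cons_self ..)
    simp only [List.map_cons, PySem.Dict.update, List.foldl_cons]
    rw [show (g.map fun c => (c, F c)).foldl (fun acc p => acc.insert p.1 p.2)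
          ((PySem.Dict.mk (dd.map fun x => (x, h x))).insert a (F a))
        = (PySem.Dict.mk (dd.map fun x => (x, if x = a then F a else h x))).update
            (g.map fun c => (c, F c)) by
      rw [pv_insert_map dd h a (F a) ha]; rfl]
    rw [ih (fun x => if x = a then F a else h x) (fun c hc => hg c (List.mem_cons_of_mem _ hc))]
    congr 1
    apply List.map_congr_left
    intro x _
    by_cases h1 : x ∈ g
    · simp [h1]
    · by_cases h2 : x = a <;> simp [h1, h2]

theorem pv_dedup_self (xs : List String) (h : xs.Nodup) :
    xs.foldl (fun s c => if s.contains c then s else s ++ [c]) [] = xs :=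
  PySem.Set.ofList_eq_self_of_nodup xs h

theorem pv_comprehension (f : String → String) (xs : List String) :
    xs.foldl (fun d c => d.insert c (f c)) PySem.Dict.empty
      = PySem.Dict.mk ((xs.foldl (fun s c => if s.contains c then s else s ++ [c]) []).map (fun c => (c, f c))) := by
  rw [show (PySem.Dict.empty : PySem.Dict String String)
        = PySem.Dict.mk (([] : List String).map (fun c => (c, f c))) by
      simp [PySem.Dict.empty]]
  exact pv_foldl_insert_map f xs []

theorem pv_while_eq (n : Nat) (g dd : List String) (h : String → String)
    (hnd : g.Nodup) (hsub : ∀ c ∈ g, c ∈ dd) :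
    pvWhileA g (n + 1) (20 - (n : Int)) (PySem.Dict.mk (dd.map (fun c => (c, h c))))
      = PySem.Dict.mk (dd.map (fun c => (c,
          if c ∈ g then pvFindKB c g (PySem.List.pyRange (20 - (n : Int)) 21 1) else h c))) := by
  induction n generalizing h with
  | zero =>
    simp only [Nat.cast_zero, sub_zero]
    rw [pvWhileA]
    rw [pv_comprehension (pvSuffixA 20) g, pv_dedup_self g hnd]
    simp only [PySem.Dict.values, List.map_map]
    rw [show (PySem.List.pyRange 20 21 1) = [20] by decide]
    by_cases hc : (PySem.Set.ofList (g.map fun c => pvSuffixA 20 c)).length = g.length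
    · rw [if_pos (by simpa [Function.comp_def] using hc)]
      rw [pv_update_map dd g (fun c => pvSuffixA 20 c) h hsub]
      apply PySem.Dict.ext
      apply List.map_congr_left
      intro x _
      by_cases hx : x ∈ g
      · simp only [hx, if_pos]
        rw [show pvFindKB x g [20] = pvSuffixB x 20 by
          simp only [pvFindKB]
          rw [if_pos (by simpa [pvSuffixB, pvSuffixA] using hc)]]
        rfl
      · simp [hx]
    · rw [if_neg (by simpa [Function.comp_def] using hc)]
      rw [if_pos (by norm_num)]
      rw [pv_comprehension (fun c => c) g, pv_dedup_self g hnd]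
      rw [pv_update_map dd g (fun c => c) h hsub]
      apply PySem.Dict.ext
      apply List.map_congr_left
      intro x _
      by_cases hx : x ∈ g
      · simp only [hx, if_pos]
        rw [show pvFindKB x g [20] = pvFindKB x g [] by
          simp only [pvFindKB]
          rw [if_neg (by simpa [pvSuffixB, pvSuffixA] using hc)]]
        rfl
      · simp [hx]
  | succ n ih =>
    have hs : ((n + 1 : Nat) : Int) = (n : Int) + 1 := by push_cast; ring
    rw [hs]
    rw [pvWhileA]
    rw [pv_comprehension (pvSuffixA (20 - ((n : Int) + 1))) g, pv_dedup_self g hnd]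
    simp only [PySem.Dict.values, List.map_map]
    rw [show PySem.List.pyRange (20 - ((n : Int) + 1)) 21 1
          = (20 - ((n : Int) + 1)) :: PySem.List.pyRange (20 - (n : Int)) 21 1 by
      rw [PySem.List.pyRange_one_cons (by omega),
          show (20 : Int) - ((n : Int) + 1) + 1 = 20 - (n : Int) by omega]]
    by_cases hc : (PySem.Set.ofList (g.map fun c => pvSuffixA (20 - ((n : Int) + 1)) c)).length = g.length
    · rw [if_pos (by simpa [Function.comp_def] using hc)]
      rw [pv_update_map dd g (fun c => pvSuffixA (20 - ((n : Int) + 1)) c) h hsub]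
      apply PySem.Dict.ext
      apply List.map_congr_left
      intro x _
      by_cases hx : x ∈ g
      · simp only [hx, if_pos]
        rw [show pvFindKB x g ((20 - ((n : Int) + 1)) :: PySem.List.pyRange (20 - (n : Int)) 21 1)
              = pvSuffixB x (20 - ((n : Int) + 1)) by
          simp only [pvFindKB]
          rw [if_pos (by simpa [pvSuffixB, pvSuffixA] using hc)]]
        rfl
      · simp [hx]
    · rw [if_neg (by simpa [Function.comp_def] using hc)]
      rw [if_neg (by omega)]
      rw [show (20 : Int) - ((n : Int) + 1) + 1 = 20 - (n : Int) by omega]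
      rw [ih h]
      apply PySem.Dict.ext
      apply List.map_congr_left
      intro x _
      by_cases hx : x ∈ g
      · simp only [hx, if_pos]
        rw [show pvFindKB x g ((20 - ((n : Int) + 1)) :: PySem.List.pyRange (20 - (n : Int)) 21 1)
              = pvFindKB x g (PySem.List.pyRange (20 - (n : Int)) 21 1) by
          simp only [pvFindKB]
          rw [if_neg (by simpa [pvSuffixB, pvSuffixA] using hc)]]
      · simp [hx]

theorem pv_getD_groups (l : String) (LI : List (String × String)) :
    ((LI.foldl (fun g p => g.modify p.2 [] (fun v => v ++ [p.1])) PySem.Dict.empty).getD l [])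
      = (LI.filter (fun p => p.2 == l)).map (·.1) := by
  have hswap : (LI.foldl (fun g p => g.modify p.2 [] (fun v => v ++ [p.1])) PySem.Dict.empty)
      = ((LI.map Prod.swap).foldl (fun g q => g.modify q.1 [] (fun v => v ++ [q.2])) PySem.Dict.empty) := by
    rw [List.foldl_map]
    rfl
  rw [hswap, PySem.Dict.getD_foldl_modify_append]
  simp [List.filter_map, List.map_map, Function.comp_def]

theorem pv_outer (ff : String → String) (dd : List String) (hdd : dd.Nodup)
    (ls : List String) (h : String → String) (hls : ls.Nodup) :
    (ls.map (fun l => dd.filter (fun c => ff c == l))).foldl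
        (fun lab colliding => if colliding.length < 2 then lab else pvWhileA colliding 19 2 lab)
        (PySem.Dict.mk (dd.map (fun c => (c, h c))))
      = PySem.Dict.mk (dd.map (fun c => (c,
          if ff c ∈ ls ∧ 2 ≤ (dd.filter (fun x => ff x == ff c)).length
          then pvFindKB c (dd.filter (fun x => ff x == ff c)) (PySem.List.pyRange 2 21 1)
          else h c))) := by
  induction ls generalizing h with
  | nil =>
    simp only [List.map_nil, List.foldl_nil]
    apply PySem.Dict.ext
    apply List.map_congr_left
    intro x _
    simp
  | cons l ls ih =>
    have hlnot : l ∉ ls := (List.nodup_cons.mp hls).1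
    have hlsn : ls.Nodup := (List.nodup_cons.mp hls).2
    simp only [List.map_cons, List.foldl_cons]
    by_cases hlen : (dd.filter (fun c => ff c == l)).length < 2
    · rw [if_pos hlen, ih h hlsn]
      apply PySem.Dict.ext
      apply List.map_congr_left
      intro x hx
      by_cases hxl : ff x = l
      · have hF : ¬ 2 ≤ (dd.filter (fun c => ff c == ff x)).length := by rw [hxl]; omega
        simp [hF]
      · simp [List.mem_cons, hxl]
    · rw [if_neg hlen]
      rw [show (19 : Nat) = 18 + 1 from rfl, show (2 : Int) = 20 - ((18 : Nat) : Int) by norm_num]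
      rw [pv_while_eq 18 (dd.filter (fun c => ff c == l)) dd h (hdd.filter _)
            (fun c hc => (List.mem_filter.mp hc).1)]
      rw [show (20 : Int) - ((18 : Nat) : Int) = 2 by norm_num]
      rw [ih _ hlsn]
      apply PySem.Dict.ext
      apply List.map_congr_left
      intro x hx
      by_cases hxl : ff x = l
      · have hmem : x ∈ dd.filter (fun c => ff c == l) :=
          List.mem_filter.mpr ⟨hx, by simp [hxl]⟩
        have hnotls : ff x ∉ ls := hxl ▸ hlnot
        have h2 : 2 ≤ (dd.filter (fun c => ff c == l)).length := by omega
        rw [hxl]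
        simp [hmem, h2]
      · have hnmem : x ∉ dd.filter (fun c => ff c == l) := by
          intro hm
          exact hxl (by simpa using (List.mem_filter.mp hm).2)
        simp [List.mem_cons, hxl, hnmem]

theorem pv_basenameB_eq : pvBasenameB = pvBasenameA := rfl

theorem pv_main (cwds : List String) :
    disambiguate_cwd_labels_py cwds = disambiguate_cwd_labels_py_alt cwds := by
  simp only [disambiguate_cwd_labels_py, disambiguate_cwd_labels_py_alt]
  rw [pv_comprehension pvBasenameA cwds]
  have hdd : (cwds.foldl (fun s c => if s.contains c then s else s ++ [c]) []).Nodup :=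
    PySem.Set.nodup_ofList cwds
  generalize hgen : cwds.foldl (fun s c => if s.contains c then s else s ++ [c]) [] = dd at hdd ⊢
  rw [pv_comprehension (fun c => pvLabelForB c dd) dd, pv_dedup_self dd hdd]
  have hknd : ((dd.map (fun c => (c, pvBasenameA c))).foldl
      (fun g p => g.modify p.2 [] (fun v => v ++ [p.1]))
      (PySem.Dict.empty : PySem.Dict String (List String))).keys.Nodup := by
    apply PySem.Dict.nodup_keys_foldl_modify_key
    simp
  have hkeys : ((dd.map (fun c => (c, pvBasenameA c))).foldl
      (fun g p => g.modify p.2 [] (fun v => v ++ [p.1]))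
      (PySem.Dict.empty : PySem.Dict String (List String))).keys
      = PySem.Set.ofList (dd.map pvBasenameA) := by
    rw [PySem.Dict.keys_foldl_modify_key]
    simp [PySem.Set.update_nil_left, List.map_map, Function.comp_def]
  have hvals : ((dd.map (fun c => (c, pvBasenameA c))).foldl
      (fun g p => g.modify p.2 [] (fun v => v ++ [p.1]))
      (PySem.Dict.empty : PySem.Dict String (List String))).values
      = (PySem.Set.ofList (dd.map pvBasenameA)).map
          (fun l => dd.filter (fun c => pvBasenameA c == l)) := by
    rw [PySem.Dict.values_eq_map_keys _ hknd [], hkeys]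
    apply List.map_congr_left
    intro l _
    rw [pv_getD_groups]
    simp [List.filter_map, List.map_map, Function.comp_def]
  rw [hvals]
  rw [pv_outer pvBasenameA dd hdd (PySem.Set.ofList (dd.map pvBasenameA)) pvBasenameA
        (PySem.Set.nodup_ofList _)]
  apply List.map_congr_left
  intro x hx
  have hmem : pvBasenameA x ∈ PySem.Set.ofList (dd.map pvBasenameA) := by
    rw [PySem.Set.mem_ofList]
    exact List.mem_map_of_mem hx
  simp only [pvLabelForB, pv_basenameB_eq]
  by_cases h2 : 2 ≤ (dd.filter (fun c => pvBasenameA c == pvBasenameA x)).length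
  · simp [hmem, h2]
    omega
  · simp [hmem, h2]
    omega

-- ===== VERDICT (by name: the statement is the Claim_ definition above) =====
theorem disambiguate_cwd_labels_py_spec : Claim_equal_disambiguate_cwd_labels_py := by
  intro cwds _
  unfold Spec_disambiguate_cwd_labels_py
  exact pv_main cwds
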